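-- pv_equiv track=rewrite | github.com/sjvrijn/Spine-Toolbox | spinetoolbox/helpers.py | rows_to_row_count_tuples
-- ===== SOURCE A (Python) =====
-- def rows_to_row_count_tuples(rows):
--     """Breaks a list of rows into a list of (row, count) tuples corresponding
--     to chunks of successive rows.
--     """
--     if not rows:
--         return []
--     sorted_rows = sorted(set(rows))
--     break_points = [k + 1 for k in range(len(sorted_rows) - 1) if sorted_rows[k] + 1 != sorted_rows[k + 1]]
--     break_points = [0] + break_points + [len(sorted_rows)]
--     ranges = [(break_points[l], break_points[l + 1]) for l in range(len(break_points) - 1)]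
--     return [(sorted_rows[start], stop - start) for start, stop in ranges]
-- ===== SOURCE B (Python) =====
-- def rows_to_row_count_tuples(rows):
--     """Breaks a list of rows into a list of (row, count) tuples corresponding
--     to chunks of successive rows.
--     """
--     if not rows:
--         return []
--     sorted_rows = sorted(set(rows))
--     result = []
--     start = sorted_rows[0]
--     count = 1
--     prev = start
--     for x in sorted_rows[1:]:
--         if x == prev + 1:
--             count += 1
--         else:
--             result.append((start, count))
--             start = x
--             count = 1
--         prev = x
--     result.append((start, count))
--     return result
-- ===== Notes on version B (the rewrite author's own statement) =====
-- stated objective: simpler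
-- what changed: Replaces A's three index-array passes (break_points comprehension over range, adjacent-pair ranges list, final indexed map) with one direct walk over sorted(set(rows)) maintaining (start, count) and appending a run at each break.
import Mathlib
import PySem

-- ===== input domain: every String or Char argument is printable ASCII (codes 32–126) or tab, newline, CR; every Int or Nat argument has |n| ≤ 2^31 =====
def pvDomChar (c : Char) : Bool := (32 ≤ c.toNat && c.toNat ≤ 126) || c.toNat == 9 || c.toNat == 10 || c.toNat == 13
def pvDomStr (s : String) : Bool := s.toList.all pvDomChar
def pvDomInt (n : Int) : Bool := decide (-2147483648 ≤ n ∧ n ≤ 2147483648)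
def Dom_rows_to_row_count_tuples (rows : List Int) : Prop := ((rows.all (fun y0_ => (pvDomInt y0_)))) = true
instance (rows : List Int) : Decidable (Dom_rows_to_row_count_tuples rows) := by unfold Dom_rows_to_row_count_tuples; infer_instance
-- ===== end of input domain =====

-- B replaces A's break_points/ranges index arrays by one direct pass over sorted(set(rows))
-- maintaining (start, count); same return value, simpler one-pass decomposition.

-- ===== PORT A =====
def rows_to_row_count_tuples (rows : List Int) : List (Int × Int) :=
  if rows = [] then []
  else
    let sorted_rows := PySem.List.sorted (PySem.Set.ofList rows) (fun x => x) false
    -- indices below are always in range, so pyGetD's default is never used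
    let break_points := ((PySem.List.pyRange 0 ((sorted_rows.length : Int) - 1) 1).filter
        (fun k => PySem.List.pyGetD sorted_rows k 0 + 1 != PySem.List.pyGetD sorted_rows (k + 1) 0)).map
        (fun k => k + 1)
    let break_points := [(0 : Int)] ++ break_points ++ [(sorted_rows.length : Int)]
    let ranges := (PySem.List.pyRange 0 ((break_points.length : Int) - 1) 1).map
        (fun l => (PySem.List.pyGetD break_points l 0, PySem.List.pyGetD break_points (l + 1) 0))
    ranges.map (fun p => (PySem.List.pyGetD sorted_rows p.1 0, p.2 - p.1))

-- ===== PORT B =====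
-- the loop of Source B: `acc` is `result`, plus the running (start, count, prev) state
def rtrctLoop (acc : List (Int × Int)) (start count prev : Int) : List Int → List (Int × Int)
  | [] => acc ++ [(start, count)]
  | x :: rest =>
      if x = prev + 1 then rtrctLoop acc start (count + 1) x rest
      else rtrctLoop (acc ++ [(start, count)]) x 1 x rest

def rows_to_row_count_tuples_alt (rows : List Int) : List (Int × Int) :=
  if rows = [] then []
  else
    match PySem.List.sorted (PySem.Set.ofList rows) (fun x => x) false with
    | [] => []  -- unreachable: sorted(set(rows)) of a nonempty list is nonempty
    | h :: t => rtrctLoop [] h 1 h t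

-- ===== PRECONDITION & SPEC =====
def Spec_rows_to_row_count_tuples (rows : List Int) (out : List (Int × Int)) : Prop := out = rows_to_row_count_tuples_alt rows
instance (rows : List Int) (out : List (Int × Int)) : Decidable (Spec_rows_to_row_count_tuples rows out) := by unfold Spec_rows_to_row_count_tuples; infer_instance

-- ===== CLAIM (what is proved, stated in full; the proofs are below) =====
def Claim_equal_rows_to_row_count_tuples : Prop := ∀ (rows : List Int), Dom_rows_to_row_count_tuples rows → Spec_rows_to_row_count_tuples rows (rows_to_row_count_tuples rows)

-- ===== LEMMAS AND PROOFS =====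

-- canonical run builder, the common reference point of both ports
def consRun (x : Int) : List (Int × Int) → List (Int × Int)
  | [] => [(x, 1)]
  | (a, c) :: r => if a = x + 1 then (x, c + 1) :: r else (x, 1) :: (a, c) :: r

def runsRef : List Int → List (Int × Int)
  | [] => []
  | x :: xs => consRun x (runsRef xs)

theorem runsRef_cons (x : Int) (xs : List Int) :
    ∃ c r, runsRef (x :: xs) = (x, c) :: r := by
  rw [show runsRef (x :: xs) = consRun x (runsRef xs) from rfl]
  cases h : runsRef xs with
  | nil => exact ⟨1, [], by simp [consRun]⟩
  | cons p r =>
      obtain ⟨a, c⟩ := p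
      by_cases hb : a = x + 1
      · exact ⟨c + 1, r, by simp [consRun, hb]⟩
      · exact ⟨1, (a, c) :: r, by simp [consRun, hb]⟩

-- ===== B-side: the loop computes runsRef =====
theorem rtrctLoop_runs (xs : List Int) : ∀ (acc : List (Int × Int)) (start count prev c : Int)
    (r : List (Int × Int)), runsRef (prev :: xs) = (prev, c) :: r →
    rtrctLoop acc start count prev xs = acc ++ (start, count - 1 + c) :: r := by
  induction xs with
  | nil =>
      intro acc start count prev c r h
      rw [show runsRef [prev] = [(prev, 1)] from rfl] at h
      simp only [List.cons.injEq, Prod.mk.injEq] at h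
      obtain ⟨⟨-, hc⟩, hr⟩ := h
      subst hc; subst hr
      simp [rtrctLoop]
  | cons x rest ih =>
      intro acc start count prev c r h
      obtain ⟨c', r', hcr⟩ := runsRef_cons x rest
      rw [show runsRef (prev :: x :: rest) = consRun prev (runsRef (x :: rest)) from rfl,
        hcr] at h
      by_cases hb : x = prev + 1
      · rw [show consRun prev ((x, c') :: r') =
            if x = prev + 1 then (prev, c' + 1) :: r' else (prev, 1) :: (x, c') :: r' from rfl,
          if_pos hb] at h
        simp only [List.cons.injEq, Prod.mk.injEq] at h
        obtain ⟨⟨-, hc⟩, hr⟩ := h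
        subst hc; subst hr
        rw [show rtrctLoop acc start count prev (x :: rest) =
            if x = prev + 1 then rtrctLoop acc start (count + 1) x rest
            else rtrctLoop (acc ++ [(start, count)]) x 1 x rest from rfl, if_pos hb]
        rw [ih acc start (count + 1) x c' r' hcr]
        have : count + 1 - 1 + c' = count - 1 + (c' + 1) := by ring
        rw [this]
      · rw [show consRun prev ((x, c') :: r') =
            if x = prev + 1 then (prev, c' + 1) :: r' else (prev, 1) :: (x, c') :: r' from rfl,
          if_neg hb] at h
        simp only [List.cons.injEq, Prod.mk.injEq] at h
        obtain ⟨⟨-, hc⟩, hr⟩ := h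
        subst hc; subst hr
        rw [show rtrctLoop acc start count prev (x :: rest) =
            if x = prev + 1 then rtrctLoop acc start (count + 1) x rest
            else rtrctLoop (acc ++ [(start, count)]) x 1 x rest from rfl, if_neg hb]
        rw [ih (acc ++ [(start, count)]) x 1 x c' r' hcr]
        simp

theorem alt_eq_runsRef (a : Int) (t : List Int) :
    rtrctLoop [] a 1 a t = runsRef (a :: t) := by
  obtain ⟨c, r, hcr⟩ := runsRef_cons a t
  rw [rtrctLoop_runs t [] a 1 a c r hcr, hcr]
  simp

-- ===== A-side: segs/cuts reformulation =====
def segsOf (s : List Int) (c : List Int) : List (Int × Int) :=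
  (c.zip c.tail).map (fun p => (PySem.List.pyGetD s p.1 0, p.2 - p.1))

def bpOf (s : List Int) : List Int :=
  ((PySem.List.pyRange 0 ((s.length : Int) - 1) 1).filter
      (fun k => PySem.List.pyGetD s k 0 + 1 != PySem.List.pyGetD s (k + 1) 0)).map
    (fun k => k + 1)

-- the ranges comprehension over break_points is adjacent-pairs zipping
theorem ranges_eq_zip (L : List Int) :
    (PySem.List.pyRange 0 ((L.length : Int) - 1) 1).map
      (fun l => (PySem.List.pyGetD L l 0, PySem.List.pyGetD L (l + 1) 0)) = L.zip L.tail := by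
  apply List.ext_getElem
  · simp [PySem.List.length_pyRange_one]
  · intro k h1 h2
    have hk : k < L.length - 1 := by
      simpa [PySem.List.length_pyRange_one] using h1
    have hkL : k < L.length := by omega
    have hk1 : k + 1 < L.length := by omega
    have e2 : PySem.List.pyGetD L ((k : Int) + 1) 0 = L[k + 1] := by
      rw [show ((k : Int) + 1) = (((k + 1 : Nat)) : Int) by push_cast; ring]
      rw [PySem.List.pyGetD_natCast]
      simp [List.getD, List.getElem?_eq_getElem hk1]
    simp [PySem.List.getElem_pyRange_one, List.getElem_tail, e2, List.getElem?_eq_getElem hkL]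

def bpN (s : List Int) : List Int :=
  ((List.range (s.length - 1)).filter
      (fun k => !(s.getD k 0 + 1 == s.getD (k + 1) 0))).map
    (fun k : Nat => (k : Int) + 1)

theorem bpOf_eq_bpN (s : List Int) : bpOf s = bpN s := by
  unfold bpOf bpN
  rw [PySem.List.pyRange_one]
  rw [List.filter_map, List.map_map]
  have hlen : ((s.length : Int) - 1 - 0).toNat = s.length - 1 := by omega
  rw [hlen]
  have hpred : ∀ k ∈ List.range (s.length - 1),
      ((fun k : Int => PySem.List.pyGetD s k 0 + 1 != PySem.List.pyGetD s (k + 1) 0) ∘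
        (fun k : Nat => (0 : Int) + k)) k = !(s.getD k 0 + 1 == s.getD (k + 1) 0) := by
    intro k _
    have e1 : (0 : Int) + (k : Int) = ((k : Nat) : Int) := by ring
    have e2 : (0 : Int) + (k : Int) + 1 = (((k + 1 : Nat)) : Int) := by push_cast; ring
    simp only [Function.comp_apply]
    rw [e2, e1, PySem.List.pyGetD_natCast, PySem.List.pyGetD_natCast]
    rfl
  rw [List.filter_congr hpred]
  apply List.map_congr_left
  intro k _
  simp only [Function.comp]
  ring

theorem bpN_nonneg (s : List Int) : ∀ a ∈ bpN s, 0 ≤ a := by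
  intro a ha
  simp only [bpN, List.mem_map] at ha
  obtain ⟨k, -, rfl⟩ := ha
  positivity

theorem bpN_single (x : Int) : bpN [x] = [] := by
  simp [bpN]

theorem bpN_cons (x y : Int) (u : List Int) :
    bpN (x :: y :: u) = (if x + 1 = y then [] else [1]) ++ (bpN (y :: u)).map (fun j => j + 1) := by
  unfold bpN
  have hl : (x :: y :: u).length - 1 = ((y :: u).length - 1) + 1 := by simp
  rw [hl, List.range_succ_eq_map, List.filter_cons]
  have hc0 : (!((x :: y :: u).getD 0 0 + 1 == (x :: y :: u).getD (0 + 1) 0)) = !(x + 1 == y) := by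
    simp [List.getD]
  rw [hc0, List.filter_map]
  have hpred : (fun k => !((x :: y :: u).getD k 0 + 1 == (x :: y :: u).getD (k + 1) 0)) ∘ Nat.succ =
      fun k => !((y :: u).getD k 0 + 1 == (y :: u).getD (k + 1) 0) := by
    funext k
    simp [Function.comp, List.getD]
  rw [hpred]
  have hmm : ∀ F : List Nat, List.map (fun k : Nat => (k : Int) + 1) (List.map Nat.succ F) =
      (List.map (fun k : Nat => (k : Int) + 1) F).map (fun j => j + 1) := by
    intro F
    rw [List.map_map, List.map_map]
    apply List.map_congr_left
    intro k _
    simp only [Function.comp, Nat.succ_eq_add_one]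
    push_cast
    ring
  by_cases hxy : x + 1 = y
  · have hb : (!(x + 1 == y)) = false := by simp [hxy]
    simp only [hb, Bool.false_eq_true, if_false, if_pos hxy, hmm, List.nil_append]
  · have hb : (!(x + 1 == y)) = true := by simp [hxy]
    simp only [hb, if_true, if_neg hxy, List.map_cons, hmm]
    simp

theorem pyGetD_shift (x a : Int) (s : List Int) (ha : 0 ≤ a) :
    PySem.List.pyGetD (x :: s) (a + 1) 0 = PySem.List.pyGetD s a 0 := by
  obtain ⟨n, rfl⟩ := Int.eq_ofNat_of_zero_le ha
  have e1 : ((n : Int) + 1) = (((n + 1 : Nat)) : Int) := by push_cast; ring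
  rw [e1, PySem.List.pyGetD_natCast, PySem.List.pyGetD_natCast]
  simp [List.getD]

theorem segsOf_shift (c : List Int) (x : Int) (s : List Int) (hc : ∀ a ∈ c, 0 ≤ a) :
    segsOf (x :: s) (c.map (fun a => a + 1)) = segsOf s c := by
  unfold segsOf
  have htail : (c.map (fun a => a + 1)).tail = c.tail.map (fun a => a + 1) := by
    cases c <;> simp
  rw [htail, List.zip_map, List.map_map]
  apply List.map_congr_left
  intro p hp
  have hp1 : p.1 ∈ c := List.of_mem_zip hp |>.1
  have h1 : 0 ≤ p.1 := hc p.1 hp1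
  simp only [Function.comp, Prod.map]
  rw [pyGetD_shift x p.1 s h1]
  have : p.2 + 1 - (p.1 + 1) = p.2 - p.1 := by ring
  rw [this]

theorem segsOf_cons_cons (s : List Int) (b : Int) (v : List Int) (h0 : PySem.List.pyGetD s 0 0 = s.headI) :
    segsOf s (0 :: b :: v) = (s.headI, b) :: segsOf s (b :: v) := by
  simp [segsOf, h0]

theorem segs_cuts_eq_runsRef (s : List Int) (h : s ≠ []) :
    segsOf s (0 :: (bpN s ++ [(s.length : Int)])) = runsRef s := by
  induction s with
  | nil => exact absurd rfl h
  | cons x t ih =>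
      cases t with
      | nil =>
          simp [bpN_single, segsOf, runsRef, consRun, PySem.List.pyGetD_zero_cons]
      | cons y u =>
          have ih' := ih (by simp)
          obtain ⟨b, v, huv⟩ := List.exists_cons_of_ne_nil
            (show bpN (y :: u) ++ [((y :: u).length : Int)] ≠ [] by simp)
          have hnn : ∀ a ∈ b :: v, 0 ≤ a := by
            rw [← huv]
            intro a ha
            rcases List.mem_append.mp ha with h1 | h1
            · exact bpN_nonneg _ a h1
            · simp at h1; subst h1; positivity
          rw [huv] at ih'
          have hkey : segsOf (y :: u) (0 :: b :: v) = (y, b) :: segsOf (y :: u) (b :: v) := by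
            rw [segsOf_cons_cons (y :: u) b v (by simp [PySem.List.pyGetD_zero_cons])]
            simp
          have hry : runsRef (y :: u) = (y, b) :: segsOf (y :: u) (b :: v) := by
            rw [← ih', hkey]
          have hlen : ((x :: y :: u).length : Int) = ((y :: u).length : Int) + 1 := by
            simp
          have hcuts : bpN (x :: y :: u) ++ [((x :: y :: u).length : Int)] =
              (if x + 1 = y then ([] : List Int) else [1]) ++ ((b :: v).map (fun a => a + 1)) := by
            rw [bpN_cons, hlen, ← huv, List.map_append]
            simp
          rw [show runsRef (x :: y :: u) = consRun x (runsRef (y :: u)) from rfl, hry, hcuts]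
          by_cases hxy : x + 1 = y
          · rw [if_pos hxy, List.nil_append, List.map_cons]
            rw [segsOf_cons_cons (x :: y :: u) (b + 1) (v.map (fun a => a + 1))
              (by simp [PySem.List.pyGetD_zero_cons])]
            rw [show ((b + 1) :: v.map (fun a => a + 1)) = (b :: v).map (fun a => a + 1) from rfl]
            rw [segsOf_shift (b :: v) x (y :: u) hnn]
            simp [consRun]
            exact hxy.symm
          · rw [if_neg hxy]
            rw [show (([(1 : Int)] ++ (b :: v).map (fun a => a + 1)) : List Int) =
              ((0 : Int) :: b :: v).map (fun a => a + 1) from by simp]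
            have hnn0 : ∀ a ∈ (0 : Int) :: b :: v, 0 ≤ a := by
              intro a ha
              rcases List.mem_cons.mp ha with h1 | h1
              · subst h1; exact le_refl 0
              · exact hnn a h1
            rw [List.map_cons]
            rw [segsOf_cons_cons (x :: y :: u) (0 + 1) ((b :: v).map (fun a => a + 1))
              (by simp [PySem.List.pyGetD_zero_cons])]
            rw [show ((0 + 1 : Int) :: (b :: v).map (fun a => a + 1)) =
              ((0 : Int) :: b :: v).map (fun a => a + 1) from rfl]
            rw [segsOf_shift ((0 : Int) :: b :: v) x (y :: u) hnn0, hkey]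
            have hne : ¬ (y = x + 1) := fun hh => hxy hh.symm
            simp only [consRun, if_neg hne, List.headI]
            norm_num

-- A's port, rewritten through segsOf/bpN
theorem portA_eq (rows : List Int) (h : ¬ rows = []) :
    rows_to_row_count_tuples rows =
      segsOf (PySem.List.sorted (PySem.Set.ofList rows) (fun x => x) false)
        (0 :: (bpN (PySem.List.sorted (PySem.Set.ofList rows) (fun x => x) false) ++
          [((PySem.List.sorted (PySem.Set.ofList rows) (fun x => x) false).length : Int)])) := by
  unfold rows_to_row_count_tuples
  rw [if_neg h]
  simp only []
  rw [ranges_eq_zip]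
  rw [← bpOf_eq_bpN]
  unfold bpOf segsOf
  simp

theorem sorted_ofList_ne_nil (rows : List Int) (h : ¬ rows = []) :
    PySem.List.sorted (PySem.Set.ofList rows) (fun x => x) false ≠ [] := by
  intro hs
  rw [PySem.List.sorted_eq_nil_iff] at hs
  cases rows with
  | nil => exact h rfl
  | cons a t =>
      have : a ∈ PySem.Set.ofList (a :: t) := (PySem.Set.mem_ofList (a :: t) a).mpr (by simp)
      rw [hs] at this
      simp at this

-- ===== VERDICT (by name: the statement is the Claim_ definition above) =====
theorem rows_to_row_count_tuples_spec : Claim_equal_rows_to_row_count_tuples := by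
  intro rows _
  unfold Spec_rows_to_row_count_tuples rows_to_row_count_tuples_alt
  by_cases h : rows = []
  · rw [if_pos h]
    unfold rows_to_row_count_tuples
    rw [if_pos h]
  · rw [if_neg h]
    rw [portA_eq rows h]
    cases hs : PySem.List.sorted (PySem.Set.ofList rows) (fun x => x) false with
    | nil => exact absurd hs (sorted_ofList_ne_nil rows h)
    | cons a t =>
        rw [show (match a :: t with
          | [] => ([] : List (Int × Int))
          | h :: t => rtrctLoop [] h 1 h t) = rtrctLoop [] a 1 a t from rfl]
        rw [alt_eq_runsRef a t]
        exact segs_cuts_eq_runsRef (a :: t) (by simp)
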